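-- pv_equiv track=rewrite | github.com/rmrighes/yajaw | src/yajaw/core/rest.py | _create_list_of_page_attr
-- ===== SOURCE A (Python) =====
-- import math
--
-- def _create_list_of_page_attr(page_attr: dict) -> list[dict]:
--     """Function that generates a list of attributes needed to retrieve all pages."""
--     if "total" not in page_attr:
--         return [page_attr]
--
--     page_attr["start_at"] = page_attr["max_results"]
--
--     page_attr_list = [
--         page_attr["start_at"] + i * page_attr["max_results"]
--         for i in range(int(math.ceil(page_attr["total"] / page_attr["max_results"])) - 1)
--     ]
--     return [{"startAt": page, "maxResults": page_attr["max_results"]} for page in page_attr_list]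
-- ===== SOURCE B (Python) =====
-- def _create_list_of_page_attr(page_attr: dict) -> list[dict]:
--     """Generate the paging attributes back-to-front from the last offset below total."""
--     if "total" not in page_attr:
--         return [page_attr]
--
--     page_attr["start_at"] = page_attr["max_results"]
--
--     max_results = page_attr["max_results"]
--     # largest offset strictly below total that is a positive multiple of max_results
--     offset = ((page_attr["total"] - 1) // max_results) * max_results
--     result = []
--     while offset >= max_results:
--         result.insert(0, {"startAt": offset, "maxResults": max_results})
--         offset -= max_results
--     return result
-- ===== Notes on version B (the rewrite author's own statement) =====
-- stated objective: alternative
-- what changed: B drops math.ceil and the forward count-based comprehensions: it computes the LAST offset directly as ((total-1)//max_results)*max_results with integer floor division and builds the result back-to-front, prepending dicts while stepping the offset down by max_results.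
-- outside the precondition, e.g. on _create_list_of_page_attr({'total': 10, 'max_results': -3}): A returns [], B does not finish within the time limit
import Mathlib
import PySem

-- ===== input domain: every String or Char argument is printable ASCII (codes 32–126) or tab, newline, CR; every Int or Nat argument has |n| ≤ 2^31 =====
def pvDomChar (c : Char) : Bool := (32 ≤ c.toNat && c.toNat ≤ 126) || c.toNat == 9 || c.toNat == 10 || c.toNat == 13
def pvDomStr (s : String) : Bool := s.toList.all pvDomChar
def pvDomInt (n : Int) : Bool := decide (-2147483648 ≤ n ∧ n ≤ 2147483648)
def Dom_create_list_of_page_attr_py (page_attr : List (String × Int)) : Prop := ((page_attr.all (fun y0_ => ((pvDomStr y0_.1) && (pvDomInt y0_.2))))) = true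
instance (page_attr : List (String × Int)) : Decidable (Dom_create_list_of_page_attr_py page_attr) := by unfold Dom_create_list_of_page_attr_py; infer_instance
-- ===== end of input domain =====

-- B replaces math.ceil and the forward count-based comprehensions by a back-to-front build: it
-- computes the LAST offset via integer floor division and prepends dicts stepping down (objective:
-- alternative). Both Pythons mutate page_attr ("start_at" := max_results); the equivalence proved
-- here is about the RETURN value only.

-- ===== PORT A =====
-- int(math.ceil(total / m)) ported as ceiling division -((-total) // m): exact on Dom, where
-- |ints| ≤ 2^31 keeps the float quotient far below the 2^53 precision bound.
def create_list_of_page_attr_py (page_attr : List (String × Int)) : List (List (String × Int)) :=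
  let d := PySem.Dict.ofList page_attr
  if d.contains "total" = false then
    [d.items]
  else
    let m := d.getD "max_results" 0        -- KeyError (missing key) excluded by Pre_
    let d := d.insert "start_at" m         -- page_attr["start_at"] = page_attr["max_results"]
    let n := -(PySem.Int.floordiv (-(d.getD "total" 0)) m) - 1   -- ZeroDivisionError (m = 0) excluded by Pre_
    let page_attr_list := (PySem.List.pyRange 0 n 1).map (fun i => d.getD "start_at" 0 + i * m)
    page_attr_list.map (fun page => [("startAt", page), ("maxResults", m)])

-- ===== PORT B =====
-- the downward while loop of Source B, prepending into result; the '0 < m' conjunct only makes the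
-- recursion well founded (Python does not terminate there; such inputs are excluded by Pre_)
def pvDownLoop (m : Int) (offset : Int) (result : List (List (String × Int))) : List (List (String × Int)) :=
  if _h : m ≤ offset ∧ 0 < m then
    pvDownLoop m (offset - m) ([("startAt", offset), ("maxResults", m)] :: result)
  else result
termination_by offset.toNat
decreasing_by omega

def create_list_of_page_attr_py_alt (page_attr : List (String × Int)) : List (List (String × Int)) :=
  let d := PySem.Dict.ofList page_attr
  if d.contains "total" = false then
    [d.items]
  else
    let d := d.insert "start_at" (d.getD "max_results" 0)
    let max_results := d.getD "max_results" 0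
    let offset := (PySem.Int.floordiv (d.getD "total" 0 - 1) max_results) * max_results
    pvDownLoop max_results offset []

-- ===== PRECONDITION & SPEC =====
-- Pre_ excludes, when "total" is a key: a missing "max_results" key and max_results = 0 (A raises
-- KeyError resp. ZeroDivisionError, and so does B) and max_results < 0, a meaningless negative
-- page size on which A's ceil-based count emits offsets stepping AWAY from total (or an empty
-- list) while B's natural descending loop returns an empty list or does not terminate — B does
-- not return a value on part of that region.
def Pre_create_list_of_page_attr_py (page_attr : List (String × Int)) : Prop :=
  (PySem.Dict.ofList page_attr).contains "total" = false ∨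
    ((PySem.Dict.ofList page_attr).contains "max_results" = true ∧
      1 ≤ (PySem.Dict.ofList page_attr).getD "max_results" 0)
instance (page_attr : List (String × Int)) : Decidable (Pre_create_list_of_page_attr_py page_attr) := by
  unfold Pre_create_list_of_page_attr_py; infer_instance

def pvWitness_create_list_of_page_attr_py : (List (String × Int)) := [("total", 11), ("max_results", 5)]

def Spec_create_list_of_page_attr_py (page_attr : List (String × Int)) (out : List (List (String × Int))) : Prop := out = create_list_of_page_attr_py_alt page_attr
instance (page_attr : List (String × Int)) (out : List (List (String × Int))) : Decidable (Spec_create_list_of_page_attr_py page_attr out) := by unfold Spec_create_list_of_page_attr_py; infer_instance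

-- ===== CLAIM (what is proved, stated in full; the proofs are below) =====
def Claim_equal_create_list_of_page_attr_py : Prop := ∀ (page_attr : List (String × Int)), Dom_create_list_of_page_attr_py page_attr → Pre_create_list_of_page_attr_py page_attr → Spec_create_list_of_page_attr_py page_attr (create_list_of_page_attr_py page_attr)

-- ===== LEMMAS AND PROOFS =====

-- B's descending loop in closed form: started at the K-th multiple of a positive step m, it
-- prepends the dicts for offsets m, 2m, …, K*m (none if K ≤ 0) in front of the accumulator.
theorem pvDownLoop_eq (m : Int) (hm : 0 < m) : ∀ (K : Int) (acc : List (List (String × Int))),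
    pvDownLoop m (K * m) acc =
      (List.range K.toNat).map
        (fun i : Nat => ([("startAt", ((i : Int) + 1) * m), ("maxResults", m)] : List (String × Int))) ++ acc := by
  intro K acc
  rw [pvDownLoop]
  by_cases hK : 1 ≤ K
  · have hle : m ≤ K * m := by nlinarith
    rw [dif_pos ⟨hle, hm⟩]
    have hstep : K * m - m = (K - 1) * m := by ring
    rw [hstep, pvDownLoop_eq m hm (K - 1)]
    have hsucc : K.toNat = (K - 1).toNat + 1 := by omega
    have hcast : (((K - 1).toNat : Int) + 1) * m = K * m := by
      have h9 : ((K - 1).toNat : Int) = K - 1 := by omega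
      rw [h9]; ring
    rw [hsucc, List.range_succ, List.map_append, List.append_assoc, List.map_cons, List.map_nil,
      List.singleton_append, hcast]
  · have hlt : ¬ (m ≤ K * m ∧ 0 < m) := by
      rintro ⟨h1, -⟩
      nlinarith
    rw [dif_neg hlt]
    have : K.toNat = 0 := by omega
    simp [this]
termination_by K acc => (K * m).toNat
decreasing_by omega

-- ===== VERDICT (by name: the statement is the Claim_ definition above) =====
theorem create_list_of_page_attr_py_spec : Claim_equal_create_list_of_page_attr_py := by
  intro page_attr _ hpre
  unfold Spec_create_list_of_page_attr_py
  by_cases htot : (PySem.Dict.ofList page_attr).contains "total" = false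
  · simp only [create_list_of_page_attr_py, create_list_of_page_attr_py_alt, if_pos htot]
  · rcases hpre with h | ⟨_, hm1⟩
    · exact absurd h htot
    simp only [create_list_of_page_attr_py, create_list_of_page_attr_py_alt, if_neg htot]
    set d := PySem.Dict.ofList page_attr with hd
    set m := d.getD "max_results" 0 with hmdef
    have hm : 0 < m := hm1
    have hstart : (d.insert "start_at" m).getD "start_at" 0 = m :=
      PySem.Dict.getD_insert_self d "start_at" m 0
    have htotv : (d.insert "start_at" m).getD "total" 0 = d.getD "total" 0 :=
      PySem.Dict.getD_insert_of_ne d m 0 (by decide)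
    have hmax : (d.insert "start_at" m).getD "max_results" 0 = m :=
      PySem.Dict.getD_insert_of_ne d m 0 (by decide)
    rw [hstart, htotv, hmax, pvDownLoop_eq m hm, PySem.List.pyRange_one, List.map_map, List.map_map]
    set total := d.getD "total" 0 with htdef
    have hdiv : PySem.Int.floordiv (total - 1) m = -(PySem.Int.floordiv (-total) m) - 1 := by
      rw [PySem.Int.floordiv_eq_ediv_of_pos hm, PySem.Int.floordiv_eq_ediv_of_pos hm]
      have h1 := Int.ediv_add_emod (total - 1) m
      have h2 := Int.ediv_add_emod (-total) m
      have h3 := Int.emod_nonneg (total - 1) (by omega : m ≠ 0)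
      have h4 := Int.emod_lt_of_pos (total - 1) hm
      have h5 := Int.emod_nonneg (-total) (by omega : m ≠ 0)
      have h6 := Int.emod_lt_of_pos (-total) hm
      set q1 := (total - 1) / m
      set q2 := (-total) / m
      nlinarith [sq_nonneg (q1 + q2 + 1), mul_self_nonneg m]
    rw [hdiv, List.append_nil]
    have hn : (-(PySem.Int.floordiv (-total) m) - 1).toNat
        = (-(PySem.Int.floordiv (-total) m) - 1 - 0).toNat := by omega
    rw [hn]
    apply List.map_congr_left
    intro k _
    have : ((k : Int) + 1) * m = m + (0 + (k : Int)) * m := by ring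
    simp only [Function.comp_apply, this]
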